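-- pv_equiv track=rewrite | github.com/serrasqueiro/tinyconf | packages/xywinter/mounts.py | solid_path
-- ===== SOURCE A (Python) =====
-- def solid_path(path) -> int:
--     """ Returns a 'solid' path name, without repeated info.
--     """
--     ux_style = "/" in path
--     a_str = path.replace("\\", "/")
--     while True:
--         last = a_str
--         if a_str.startswith("./"):
--             a_str = a_str[2:]
--         if last == a_str:
--             break
--     if not ux_style:
--         a_str = a_str.replace("/", "\\")
--     return a_str
-- ===== SOURCE B (Python) =====
-- def solid_path(path) -> int:
--     """ Returns a 'solid' path name, without repeated info.
--     """
--     ux_style = "/" in path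
--     a_str = path.replace("\\", "/")
--     i = 0
--     while a_str.startswith("./", i):
--         i += 2
--     a_str = a_str[i:]
--     if not ux_style:
--         a_str = a_str.replace("/", "\\")
--     return a_str
-- ===== Notes on version B (the rewrite author's own statement) =====
-- stated objective: alternative
-- what changed: B scans once with an advancing offset (startswith at index i) and performs a single slice, instead of A's fixpoint loop that repeatedly re-slices the string and compares it with its previous value.
import Mathlib
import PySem

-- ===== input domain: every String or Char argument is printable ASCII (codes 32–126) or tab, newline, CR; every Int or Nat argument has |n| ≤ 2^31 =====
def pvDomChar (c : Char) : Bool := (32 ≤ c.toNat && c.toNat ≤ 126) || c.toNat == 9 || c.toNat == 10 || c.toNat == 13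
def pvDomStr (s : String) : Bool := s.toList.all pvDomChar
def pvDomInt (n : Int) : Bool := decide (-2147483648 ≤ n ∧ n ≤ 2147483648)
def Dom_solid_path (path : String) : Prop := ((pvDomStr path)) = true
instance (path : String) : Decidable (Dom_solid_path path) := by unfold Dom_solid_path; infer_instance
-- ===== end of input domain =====

-- B replaces A's fixpoint loop (re-slice until unchanged) by a single scan with an
-- advancing offset followed by one slice; same return value, alternative structure.

-- startswith "./" implies the (rest of the) string has at least 2 characters
-- (used by both ports' termination proofs, cited by name in decreasing_by)
theorem pv_sw_len (s : List Char) (i : Nat)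
    (h : PySem.Chars.startswith (List.drop i s) ['.', '/'] = true) : i + 2 ≤ s.length := by
  have hp := (PySem.Chars.startswith_iff _ _).1 h
  have hl := hp.length_le
  simp at hl
  omega

-- ===== PORT A =====
-- s[2:] : slice with nonnegative start = drop (exact)
def solid_path_strip (s : List Char) : List Char :=
  -- loop body: last := s; if startswith: s := s[2:]; if last == s: break
  if h : PySem.Chars.startswith s ['.', '/'] = true then
    if s = PySem.Chars.slice s (some 2) none then PySem.Chars.slice s (some 2) none
    else solid_path_strip (PySem.Chars.slice s (some 2) none)
  else s
termination_by s.length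
decreasing_by
  have h2 : (0:Nat) + 2 ≤ s.length := pv_sw_len s 0 (by simpa using h)
  simp [PySem.Chars.slice_eq_listSlice, PySem.List.slice_from (xs := s) (a := 2) (by norm_num)]
  omega

def solid_path (path : String) : String :=
  let ux_style := PySem.Chars.isIn ['/'] path.toList
  let a_str := PySem.Chars.replace path.toList ['\\'] ['/']
  let a_str := solid_path_strip a_str
  String.ofList (if ux_style then a_str else PySem.Chars.replace a_str ['/'] ['\\'])

-- ===== PORT B =====
-- a_str.startswith("./", i) with i ≥ 0 ported as startswith on (drop i) (exact: Python
-- clamps the start bound the same way drop does)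
def solid_path_skip (s : List Char) (i : Nat) : Nat :=
  if h : PySem.Chars.startswith (List.drop i s) ['.', '/'] = true then
    solid_path_skip s (i + 2)
  else i
termination_by s.length - i
decreasing_by
  have := pv_sw_len s i h
  omega

def solid_path_alt (path : String) : String :=
  let ux_style := PySem.Chars.isIn ['/'] path.toList
  let a_str := PySem.Chars.replace path.toList ['\\'] ['/']
  let a_str := List.drop (solid_path_skip a_str 0) a_str  -- a_str[i:], i ≥ 0: exact as drop
  String.ofList (if ux_style then a_str else PySem.Chars.replace a_str ['/'] ['\\'])

-- ===== PRECONDITION & SPEC =====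
def Spec_solid_path (path : String) (out : String) : Prop := out = solid_path_alt path
instance (path : String) (out : String) : Decidable (Spec_solid_path path out) := by unfold Spec_solid_path; infer_instance

-- ===== CLAIM (what is proved, stated in full; the proofs are below) =====
def Claim_equal_solid_path : Prop := ∀ (path : String), Dom_solid_path path → Spec_solid_path path (solid_path path)

-- ===== LEMMAS AND PROOFS =====
theorem pv_slice2_eq_drop (s : List Char) :
    PySem.Chars.slice s (some 2) none = List.drop 2 s := by
  simp [PySem.Chars.slice_eq_listSlice, PySem.List.slice_from (xs := s) (a := 2) (by norm_num)]

theorem pv_strip_eq_drop_skip (n : Nat) :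
    ∀ (s : List Char) (i : Nat), s.length - i ≤ n →
      List.drop (solid_path_skip s i) s = solid_path_strip (List.drop i s) := by
  induction n with
  | zero =>
    intro s i hle
    rw [solid_path_skip, solid_path_strip]
    by_cases h : PySem.Chars.startswith (List.drop i s) ['.', '/'] = true
    · have := pv_sw_len s i h; omega
    · simp [h]
  | succ n ih =>
    intro s i hle
    rw [solid_path_skip, solid_path_strip]
    by_cases h : PySem.Chars.startswith (List.drop i s) ['.', '/'] = true
    · have hlen := pv_sw_len s i h
      simp only [h, dif_pos]
      rw [pv_slice2_eq_drop, List.drop_drop]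
      have hne : ¬ (List.drop i s = List.drop (i + 2) s) := by
        intro hEq
        have := congrArg List.length hEq
        simp at this
        omega
      rw [if_neg hne]
      exact ih s (i + 2) (by omega)
    · simp [h]

theorem pv_strip_skip (s : List Char) :
    List.drop (solid_path_skip s 0) s = solid_path_strip s := by
  have := pv_strip_eq_drop_skip s.length s 0 (by omega)
  simpa using this

-- ===== VERDICT (by name: the statement is the Claim_ definition above) =====
theorem solid_path_spec : Claim_equal_solid_path := by
  intro path _
  unfold Spec_solid_path
  simp only [solid_path, solid_path_alt, pv_strip_skip]
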